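-- pv_equiv track=rewrite | github.com/ASSERT-KTH/Mokav | experiments/pynguin/c4b/return-lst/generated_tests/src_1869/4/src_1869.py | func
-- ===== SOURCE A (Python) =====
-- def func(*args):
-- 	ret_values = []
--
-- 	n = int(args[0])
-- 	if (n & 1):
-- 	    ret_values.append((n // 2))
-- 	else:
-- 	    k = 1
-- 	    while (k <= n):
-- 	        k *= 2
-- 	    ret_values.append(((n - (k // 2)) // 2))
--
-- 	return ret_values
-- ===== SOURCE B (Python) =====
-- def func(*args):
--     n = int(args[0])
--     if n % 2 or n <= 0:
--         return [n // 2]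
--     # even positive n: A returns (n - p) // 2 where p is the largest power of
--     # two <= n; that equals n // 2 with its highest binary digit cleared.
--     def clear_top(m):
--         # m >= 1: m with its most significant bit removed, by binary recursion
--         return 0 if m == 1 else 2 * clear_top(m // 2) + m % 2
--     return [clear_top(n // 2)]
-- ===== Notes on version B (the rewrite author's own statement) =====
-- stated objective: alternative
-- what changed: Instead of a doubling while-loop that searches upward for the first power of two above n, B uses a top-down binary recursion clear_top that halves n//2 down to 1 and rebuilds it without its most significant bit, which equals A's (n - largest power of two <= n) // 2 on positive even n; odd, zero and negative inputs collapse to a single n // 2 return.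
import Mathlib
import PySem

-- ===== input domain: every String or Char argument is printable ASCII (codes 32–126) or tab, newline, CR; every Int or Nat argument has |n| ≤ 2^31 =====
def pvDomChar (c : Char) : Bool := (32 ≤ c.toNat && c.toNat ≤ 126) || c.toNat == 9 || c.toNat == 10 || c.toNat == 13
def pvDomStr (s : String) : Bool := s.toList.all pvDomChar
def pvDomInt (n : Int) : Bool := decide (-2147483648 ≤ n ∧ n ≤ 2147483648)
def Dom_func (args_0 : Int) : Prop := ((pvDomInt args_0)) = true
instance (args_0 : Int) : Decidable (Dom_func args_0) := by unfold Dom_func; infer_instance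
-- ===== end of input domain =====

-- B replaces A's doubling while-loop (smallest power of two above n) by a top-down binary
-- recursion that clears the most significant bit of n // 2; return value only (no mutation).

-- ===== PORT A =====
-- the `k = 1; while k <= n: k *= 2` loop; Python runs it only from k = 1, so 0 < k always
-- holds there; the `0 < k` test here is only the totality guard for that same loop.
def funcLoop (n k : Int) : Int :=
  if _hk : 0 < k then
    if _h : k ≤ n then funcLoop n (k * 2) else k
  else k
termination_by (n + 1 - k).toNat
decreasing_by omega

def func (args_0 : Int) : List Int :=
  if PySem.Int.band args_0 1 ≠ 0 then          -- if (n & 1):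
    [PySem.Int.floordiv args_0 2]
  else                                         -- k = 1; while k <= n: k *= 2
    [PySem.Int.floordiv (args_0 - PySem.Int.floordiv (funcLoop args_0 1) 2) 2]

-- ===== PORT B =====
-- clear_top(m): m with its most significant bit removed, binary recursion on m // 2.
-- Python's recursion is only ever called with m >= 1 (base case m == 1); the `m ≤ 1`
-- guard here is the totality guard for that same computation.
def clearTop (m : Int) : Int :=
  if _h : m ≤ 1 then 0
  else 2 * clearTop (PySem.Int.floordiv m 2) + PySem.Int.mod m 2
termination_by m.toNat
decreasing_by
  rw [PySem.Int.floordiv_eq_ediv_of_pos (by omega)]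
  omega

def func_alt (args_0 : Int) : List Int :=
  if PySem.Int.mod args_0 2 ≠ 0 ∨ args_0 ≤ 0 then
    [PySem.Int.floordiv args_0 2]
  else
    [clearTop (PySem.Int.floordiv args_0 2)]

-- ===== PRECONDITION & SPEC =====
def Spec_func (args_0 : Int) (out : List Int) : Prop := out = func_alt args_0
instance (args_0 : Int) (out : List Int) : Decidable (Spec_func args_0 out) := by unfold Spec_func; infer_instance

-- ===== CLAIM (what is proved, stated in full; the proofs are below) =====
def Claim_equal_func : Prop := ∀ (args_0 : Int), Dom_func args_0 → Spec_func args_0 (func args_0)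

-- ===== LEMMAS AND PROOFS =====

-- the loop from an even start mirrors the loop on n / 2 from half the start
lemma funcLoop_half (n : Int) : ∀ (d : Nat) (k : Int), 0 < k → (n + 1 - 2 * k).toNat ≤ d →
    funcLoop n (2 * k) = 2 * funcLoop (n / 2) k := by
  intro d
  induction d with
  | zero =>
    intro k hk hd
    rw [funcLoop]
    conv_rhs => rw [funcLoop]
    have h1 : ¬ (2 * k ≤ n) := by omega
    have h2 : ¬ (k ≤ n / 2) := by omega
    simp [hk, h1, h2]
  | succ d ih =>
    intro k hk hd
    rw [funcLoop]
    conv_rhs => rw [funcLoop]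
    rw [dif_pos (show (0:Int) < 2 * k by omega), dif_pos hk]
    by_cases h1 : 2 * k ≤ n
    · rw [dif_pos h1, dif_pos (show k ≤ n / 2 by omega),
        show 2 * k * 2 = 2 * (k * 2) by ring]
      exact ih (k * 2) (by omega) (by omega)
    · rw [dif_neg h1, dif_neg (show ¬ k ≤ n / 2 by omega)]

lemma funcLoop_one_half (n : Int) (hn : 1 ≤ n) :
    funcLoop n 1 = 2 * funcLoop (n / 2) 1 := by
  rw [funcLoop]
  simp only [show (0:Int) < 1 by omega, hn, dite_true]
  have := funcLoop_half n (n + 1 - 2).toNat 1 (by omega) (by omega)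
  simpa using this

lemma funcLoop_pos (n : Int) : ∀ (d : Nat) (k : Int), 0 < k → (n + 1 - k).toNat ≤ d →
    0 < funcLoop n k := by
  intro d
  induction d with
  | zero =>
    intro k hk hd
    rw [funcLoop]
    have : ¬ (k ≤ n) := by omega
    simpa [hk, this] using hk
  | succ d ih =>
    intro k hk hd
    rw [funcLoop]
    by_cases h : k ≤ n
    · simp only [hk, h, dite_true]; exact ih (k * 2) (by omega) (by omega)
    · simpa [hk, h] using hk

-- clearTop m = m - (smallest power of two above m) / 2, for m ≥ 1
lemma clearTop_eq : ∀ (d : Nat) (m : Int), 1 ≤ m → m.toNat ≤ d →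
    clearTop m = m - funcLoop m 1 / 2 := by
  intro d
  induction d with
  | zero => intro m hm hd; exfalso; omega
  | succ d ih =>
    intro m hm hd
    rw [clearTop]
    by_cases h1 : m ≤ 1
    · -- m = 1: the loop returns 2
      have hm1 : m = 1 := by omega
      subst hm1
      rw [funcLoop]; norm_num
      rw [funcLoop]; norm_num
    · -- m ≥ 2
      simp only [h1, dite_false]
      rw [PySem.Int.floordiv_eq_ediv_of_pos (by omega), PySem.Int.mod_eq_emod_of_pos (by omega)]
      rw [ih (m / 2) (by omega) (by omega)]
      rw [funcLoop_one_half m (by omega), funcLoop_one_half (m / 2) (by omega)]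
      have hG := funcLoop_pos (m / 2 / 2) ((m / 2 / 2 + 1 - 1).toNat) 1 (by omega) (by omega)
      omega

-- ===== VERDICT (by name: the statement is the Claim_ definition above) =====
theorem func_spec : Claim_equal_func := by
  intro n _
  unfold Spec_func func func_alt
  rw [PySem.Int.band_one, PySem.Int.mod_eq_emod_of_pos (show (0:Int) < 2 by omega)]
  by_cases hodd : n % 2 ≠ 0
  · rw [if_pos hodd, if_pos (Or.inl hodd)]
  · rw [if_neg hodd]
    by_cases hn : n ≤ 0
    · -- loop body never runs: k = 1, k // 2 = 0
      rw [if_pos (Or.inr hn), funcLoop, dif_pos (by omega : (0:Int) < 1),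
        dif_neg (by omega : ¬ (1 : Int) ≤ n),
        show PySem.Int.floordiv (1 : Int) 2 = 0 from by decide, sub_zero]
    · -- even, n ≥ 2
      push_neg at hodd hn
      rw [if_neg (by omega : ¬ (n % 2 ≠ 0 ∨ n ≤ 0))]
      rw [clearTop_eq ((PySem.Int.floordiv n 2).toNat) (PySem.Int.floordiv n 2)
        (by rw [PySem.Int.floordiv_eq_ediv_of_pos (by omega)]; omega) (le_refl _)]
      rw [funcLoop_one_half n (by omega)]
      rw [PySem.Int.floordiv_eq_ediv_of_pos (show (0:Int) < 2 by omega),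
          PySem.Int.floordiv_eq_ediv_of_pos (show (0:Int) < 2 by omega),
          PySem.Int.floordiv_eq_ediv_of_pos (show (0:Int) < 2 by omega)]
      rw [funcLoop_one_half (n / 2) (by omega)]
      have hG := funcLoop_pos (n / 2 / 2) ((n / 2 / 2 + 1 - 1).toNat) 1 (by omega) (by omega)
      simp only [List.cons.injEq, and_true]
      omega
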